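-- pv_equiv track=rewrite | github.com/egiganti/FireSentinel | src/firesentinel/dashboard/pages/map.py | _severity_breakdown_text
-- ===== SOURCE A (Python) =====
-- from typing import Any
--
-- def _severity_breakdown_text(events: list[dict[str, Any]]) -> str:
--     """Build a compact severity breakdown string like 'C:2 A:5 M:12 B:3'."""
--     counts: dict[str, int] = {"critical": 0, "high": 0, "medium": 0, "low": 0}
--     for ev in events:
--         sev = ev.get("severity", "medium")
--         counts[sev] = counts.get(sev, 0) + 1
--
--     parts = []
--     abbrev = {"critical": "C", "high": "A", "medium": "M", "low": "B"}
--     for key in ("critical", "high", "medium", "low"):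
--         if counts.get(key, 0) > 0:
--             parts.append(f"{abbrev[key]}:{counts[key]}")
--
--     return " | ".join(parts) if parts else "Sin eventos"
-- ===== SOURCE B (Python) =====
-- from typing import Any
--
-- def _severity_breakdown_text(events: list[dict[str, Any]]) -> str:
--     """Build a compact severity breakdown string like 'C:2 A:5 M:12 B:3'."""
--     parts = []
--     for key, abbrev in (("critical", "C"), ("high", "A"), ("medium", "M"), ("low", "B")):
--         cnt = sum(1 for ev in events if ev.get("severity", "medium") == key)
--         if cnt > 0:
--             parts.append(f"{abbrev}:{cnt}")
--     return " | ".join(parts) if parts else "Sin eventos"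
-- ===== Notes on version B (the rewrite author's own statement) =====
-- stated objective: alternative
-- what changed: Replaces the upfront tally dict (single pass building counts, then a lookup loop) with a direct per-category scan: for each of the four fixed categories, count matching events with a generator sum and emit the part immediately.
import Mathlib
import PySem

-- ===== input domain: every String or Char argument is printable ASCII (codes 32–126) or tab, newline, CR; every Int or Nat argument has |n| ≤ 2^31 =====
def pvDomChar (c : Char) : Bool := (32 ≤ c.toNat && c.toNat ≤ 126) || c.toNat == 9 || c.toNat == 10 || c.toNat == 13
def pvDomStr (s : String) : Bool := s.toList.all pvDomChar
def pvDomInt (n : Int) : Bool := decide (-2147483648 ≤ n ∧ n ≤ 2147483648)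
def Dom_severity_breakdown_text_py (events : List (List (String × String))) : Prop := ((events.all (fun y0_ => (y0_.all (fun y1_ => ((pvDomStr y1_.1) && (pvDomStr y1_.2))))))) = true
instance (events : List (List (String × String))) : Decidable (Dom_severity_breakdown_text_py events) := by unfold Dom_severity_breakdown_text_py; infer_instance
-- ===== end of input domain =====

-- ===== PORT A =====
-- B replaces A's upfront tally dict with a direct per-category scan (alternative decomposition, same cost).
def pvSev (ev : List (String × String)) : String :=
  (PySem.Dict.mk ev).getD "severity" "medium"

def severity_breakdown_text_py (events : List (List (String × String))) : String :=
  let counts0 : PySem.Dict String Int := PySem.Dict.mk [("critical", 0), ("high", 0), ("medium", 0), ("low", 0)]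
  let counts := events.foldl (fun c ev =>
      let sev := pvSev ev
      c.insert sev (c.getD sev 0 + 1)) counts0
  let ab : PySem.Dict String String := PySem.Dict.mk [("critical", "C"), ("high", "A"), ("medium", "M"), ("low", "B")]
  -- abbrev[key] raises KeyError only for absent keys; every key of the loop is present, getD "" is exact here
  let parts := ["critical", "high", "medium", "low"].foldl (fun ps key =>
      if counts.getD key 0 > 0 then ps ++ [ab.getD key "" ++ ":" ++ PySem.Int.toStr (counts.getD key 0)] else ps) []
  if parts ≠ [] then PySem.Str.join " | " parts else "Sin eventos"

-- ===== PORT B =====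
def severity_breakdown_text_py_alt (events : List (List (String × String))) : String :=
  let parts := [("critical", "C"), ("high", "A"), ("medium", "M"), ("low", "B")].foldl
      (fun ps (kv : String × String) =>
        let cnt := events.foldl (fun n ev => if pvSev ev == kv.1 then n + 1 else n) (0 : Int)
        if cnt > 0 then ps ++ [kv.2 ++ ":" ++ PySem.Int.toStr cnt] else ps) []
  if parts ≠ [] then PySem.Str.join " | " parts else "Sin eventos"

-- ===== PRECONDITION & SPEC =====
def Spec_severity_breakdown_text_py (events : List (List (String × String))) (out : String) : Prop := out = severity_breakdown_text_py_alt events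
instance (events : List (List (String × String))) (out : String) : Decidable (Spec_severity_breakdown_text_py events out) := by unfold Spec_severity_breakdown_text_py; infer_instance

-- ===== CLAIM (what is proved, stated in full; the proofs are below) =====
def Claim_equal_severity_breakdown_text_py : Prop := ∀ (events : List (List (String × String))), Dom_severity_breakdown_text_py events → Spec_severity_breakdown_text_py events (severity_breakdown_text_py events)

-- ===== LEMMAS AND PROOFS =====

-- A's tally lookup equals B's per-category scan, for any initial count 0 at that key
theorem pv_count_eq (events : List (List (String × String))) (k : String)
    (d : PySem.Dict String Int) (h : d.getD k 0 = 0) :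
    (events.foldl (fun c ev => c.insert (pvSev ev) (c.getD (pvSev ev) 0 + 1)) d).getD k 0
      = events.foldl (fun n ev => if pvSev ev == k then n + 1 else n) (0 : Int) := by
  rw [PySem.List.foldl_count_if (fun ev => pvSev ev == k) events 0]
  have := PySem.Dict.getD_foldl_insert_add_one (events.map pvSev) d k
  rw [List.foldl_map] at this
  rw [this, h, List.count_eq_countP, List.countP_map]
  simp [Function.comp_def, BEq.comm]

-- ===== VERDICT (by name: the statement is the Claim_ definition above) =====
theorem severity_breakdown_text_py_spec : Claim_equal_severity_breakdown_text_py := by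
  intro events _
  unfold Spec_severity_breakdown_text_py severity_breakdown_text_py severity_breakdown_text_py_alt
  simp only [List.foldl]
  rw [pv_count_eq events "critical" _ (by decide), pv_count_eq events "high" _ (by decide),
      pv_count_eq events "medium" _ (by decide), pv_count_eq events "low" _ (by decide)]
  simp [PySem.Dict.getD, PySem.Dict.get?]
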